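-- pv_equiv track=rewrite | github.com/Japesh285/SIte_scrapper | app/detectors/browser.py | _looks_like_api_url
-- ===== SOURCE A (Python) =====
-- def _looks_like_api_url(url: str) -> bool:
--     lowered = (url or "").lower()
--     return any(
--         token in lowered
--         for token in (
--             "api",
--             "graphql",
--             "job",
--             "career",
--             "position",
--             "opening",
--             "greenhouse",
--             "workday",
--         )
--     )
-- ===== SOURCE B (Python) =====
-- _TOKENS = (
--     "api",
--     "graphql",
--     "job",
--     "career",
--     "position",
--     "opening",
--     "greenhouse",
--     "workday",
-- )
--
-- # index the tokens by their first character once, so each position of the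
-- # string only checks the (at most two) tokens that could start there
-- _BY_FIRST = {}
-- for _t in _TOKENS:
--     _BY_FIRST.setdefault(_t[0], []).append(_t)
--
--
-- def _looks_like_api_url(url: str) -> bool:
--     lowered = (url or "").lower()
--     for j, ch in enumerate(lowered):
--         for token in _BY_FIRST.get(ch, ()):
--             if lowered.startswith(token, j):
--                 return True
--     return False
-- ===== Notes on version B (the rewrite author's own statement) =====
-- stated objective: alternative
-- what changed: Instead of running eight independent membership searches of the lowered string, B makes a single left-to-right pass over it, dispatching through a dict that indexes the tokens by first character and checking only the matching tokens as prefixes at each position.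
import Mathlib
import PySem

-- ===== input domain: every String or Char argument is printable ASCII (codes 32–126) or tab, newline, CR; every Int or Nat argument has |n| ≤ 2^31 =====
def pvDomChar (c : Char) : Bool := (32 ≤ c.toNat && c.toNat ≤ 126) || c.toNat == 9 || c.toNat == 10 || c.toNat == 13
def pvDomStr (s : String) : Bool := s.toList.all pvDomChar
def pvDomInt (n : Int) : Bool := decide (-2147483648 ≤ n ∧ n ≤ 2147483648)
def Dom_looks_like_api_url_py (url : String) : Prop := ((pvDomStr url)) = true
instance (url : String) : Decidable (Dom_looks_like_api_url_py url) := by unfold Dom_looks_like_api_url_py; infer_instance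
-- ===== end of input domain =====

-- B replaces A's eight independent substring searches by a single left-to-right pass
-- dispatching through a first-character index of the same tokens (objective: alternative).

-- ===== PORT A =====
def pvTokensA : List String :=
  ["api", "graphql", "job", "career", "position", "opening", "greenhouse", "workday"]

def looks_like_api_url_py (url : String) : Bool :=
  let lowered := PySem.Str.lower (if url = "" then "" else url)
  pvTokensA.any (fun token => PySem.Str.isIn token lowered)

-- ===== PORT B =====
def pvTokensB : List (List Char) :=
  ["api".toList, "graphql".toList, "job".toList, "career".toList,
   "position".toList, "opening".toList, "greenhouse".toList, "workday".toList]

-- _BY_FIRST: module-level dict built once from the tokens (setdefault + append)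
def pvByFirst : PySem.Dict Char (List (List Char)) :=
  pvTokensB.foldl (fun d t =>
    match t with
    | [] => d
    | c :: _ => d.insert c (d.getD c [] ++ [t])) PySem.Dict.empty

-- the `for j, ch in enumerate(lowered)` loop, as recursion over the suffixes;
-- `lowered.startswith(token, j)` at in-range j is a prefix test on the j-th suffix
def pvScan : List Char → Bool
  | [] => false
  | c :: rest =>
    ((pvByFirst.getD c []).any (fun t => t.isPrefixOf (c :: rest))) || pvScan rest

def looks_like_api_url_py_alt (url : String) : Bool :=
  pvScan (PySem.Str.lower (if url = "" then "" else url)).toList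

-- ===== PRECONDITION & SPEC =====
def Spec_looks_like_api_url_py (url : String) (out : Bool) : Prop := out = looks_like_api_url_py_alt url
instance (url : String) (out : Bool) : Decidable (Spec_looks_like_api_url_py url out) := by unfold Spec_looks_like_api_url_py; infer_instance

-- ===== CLAIM (what is proved, stated in full; the proofs are below) =====
def Claim_equal_looks_like_api_url_py : Prop := ∀ (url : String), Dom_looks_like_api_url_py url → Spec_looks_like_api_url_py url (looks_like_api_url_py url)

-- ===== LEMMAS AND PROOFS =====

theorem pvTokensB_ne_nil : ∀ t ∈ pvTokensB, t ≠ [] := by decide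

theorem pvTokensB_eq_map : pvTokensB = pvTokensA.map String.toList := by rfl

set_option maxHeartbeats 2000000 in
theorem pvByFirst_eq : pvByFirst =
    PySem.Dict.mk [('a', ["api".toList]), ('g', ["graphql".toList, "greenhouse".toList]),
      ('j', ["job".toList]), ('c', ["career".toList]), ('p', ["position".toList]),
      ('o', ["opening".toList]), ('w', ["workday".toList])] := by
  rfl

set_option maxHeartbeats 2000000 in
set_option maxRecDepth 10000 in
theorem bucket_sub (c : Char) (t : List Char) (h : t ∈ pvByFirst.getD c []) :
    t ∈ pvTokensB ∧ t.head? = some c := by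
  rw [pvByFirst_eq] at h
  simp only [PySem.Dict.getD, PySem.Dict.get?_mk_cons] at h
  split_ifs at h <;> simp_all [pvTokensB] <;>
    (try (rcases h with h | h <;> (try simp_all))) <;> assumption

set_option maxHeartbeats 2000000 in
set_option maxRecDepth 10000 in
theorem tokens_to_bucket (t : List Char) (ht : t ∈ pvTokensB) (c : Char)
    (hc : t.head? = some c) : t ∈ pvByFirst.getD c [] := by
  rw [pvByFirst_eq]
  simp only [pvTokensB, List.mem_cons, List.not_mem_nil, or_false] at ht
  rcases ht with rfl | rfl | rfl | rfl | rfl | rfl | rfl | rfl <;>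
    (simp at hc; subst hc; decide)

theorem pvScan_iff (s : List Char) :
    pvScan s = true ↔ ∃ t ∈ pvTokensB, ∃ j, t <+: s.drop j := by
  induction s with
  | nil =>
    simp only [pvScan]
    constructor
    · intro h; exact absurd h Bool.false_ne_true
    · rintro ⟨t, ht, j, hp⟩
      exact absurd (List.prefix_nil.mp (by simpa using hp)) (pvTokensB_ne_nil t ht)
  | cons c rest ih =>
    simp only [pvScan, Bool.or_eq_true, ih, List.any_eq_true]
    constructor
    · rintro (⟨t, ht, hp⟩ | ⟨t, ht, j, hp⟩)
      · exact ⟨t, (bucket_sub c t ht).1, 0, by simpa using List.isPrefixOf_iff_prefix.mp hp⟩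
      · exact ⟨t, ht, j + 1, by simpa using hp⟩
    · rintro ⟨t, ht, j, hp⟩
      cases j with
      | zero =>
        left
        have hhead : t.head? = some c := by
          simp only [List.drop_zero] at hp
          rcases hp with ⟨u, hu⟩
          cases t with
          | nil => exact absurd rfl (pvTokensB_ne_nil _ ht)
          | cons a t' =>
            simp only [List.cons_append, List.cons.injEq] at hu
            simp [hu.1]
        exact ⟨t, tokens_to_bucket t ht c hhead,
          List.isPrefixOf_iff_prefix.mpr (by simpa using hp)⟩
      | succ j => right; exact ⟨t, ht, j, by simpa using hp⟩

theorem looks_like_api_url_py_spec : Claim_equal_looks_like_api_url_py := by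
  unfold Claim_equal_looks_like_api_url_py
  intro url _
  unfold Spec_looks_like_api_url_py looks_like_api_url_py looks_like_api_url_py_alt
  rw [Bool.eq_iff_iff]
  simp only [List.any_eq_true, PySem.Str.isIn_iff_infix, pvScan_iff, pvTokensB_eq_map,
    List.mem_map]
  constructor
  · rintro ⟨tok, htok, hinf⟩
    rcases (PySem.Chars.exists_prefix_drop_iff_isIn tok.toList _).mpr
        ((PySem.Chars.isIn_iff_infix _ _).mpr hinf) with ⟨j, hj⟩
    exact ⟨tok.toList, ⟨tok, htok, rfl⟩, j, hj⟩
  · rintro ⟨t, ⟨tok, htok, rfl⟩, j, hj⟩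
    exact ⟨tok, htok, (PySem.Chars.isIn_iff_infix _ _).mp
      ((PySem.Chars.exists_prefix_drop_iff_isIn _ _).mp ⟨j, hj⟩)⟩
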